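-- pv_equiv track=rewrite | github.com/diegoPenguino/Trainings | EGOI 2023/Zeros/full_sol.py | compute_largest_k
-- ===== SOURCE A (Python) =====
-- def check(a: int, b: int, value: int) -> bool:
--     highest_mult = b // value
--     highest_mult *= value
--     return a <= highest_mult
--
-- def compute_largest_k(a: int, b: int, base: int) -> int:
--     largest_k = 0
--     value = 1
--     k = 0
--     while(value <= b):
--         value *= base
--         if value > b:
--             break
--         k += 1
--         if(check(a, b, value)):
--             largest_k = k
--     return largest_k
-- ===== SOURCE B (Python) =====
-- def compute_largest_k(a, b, base):
--     # Binary search for the largest exponent k >= 1 such that some multiple of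
--     # base**k lies in [a, b]; the predicate is monotone in k, so search [0, bit_length(b)).
--     if b < 1 or base < 2:
--         return 0
--     lo, hi = 0, b.bit_length()
--     while hi - lo > 1:
--         mid = (lo + hi) // 2
--         v = base ** mid
--         if v <= b and (b // v) * v >= a:
--             lo = mid
--         else:
--             hi = mid
--     return lo
-- ===== Notes on version B (the rewrite author's own statement) =====
-- stated objective: alternative
-- what changed: Replaces A's linear upward scan over exponents (multiply value by base each step, remember the last k whose power has a multiple in [a,b]) by a binary search over the exponent range [0, b.bit_length()), exploiting that the predicate 'some multiple of base**k lies in [a,b]' is monotone in k.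
-- outside the precondition, e.g. on compute_largest_k(-20, 10, -2): A returns 3, B returns 0
import Mathlib
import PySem

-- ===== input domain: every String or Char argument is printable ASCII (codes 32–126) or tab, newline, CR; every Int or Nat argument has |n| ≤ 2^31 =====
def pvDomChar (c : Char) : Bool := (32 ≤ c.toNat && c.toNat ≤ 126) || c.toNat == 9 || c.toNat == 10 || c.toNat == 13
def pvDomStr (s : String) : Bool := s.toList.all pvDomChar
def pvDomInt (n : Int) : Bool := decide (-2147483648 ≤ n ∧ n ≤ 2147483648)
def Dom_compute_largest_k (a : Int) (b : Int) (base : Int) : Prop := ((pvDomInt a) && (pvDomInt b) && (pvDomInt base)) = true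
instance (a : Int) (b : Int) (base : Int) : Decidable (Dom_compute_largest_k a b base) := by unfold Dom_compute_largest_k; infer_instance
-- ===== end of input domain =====

-- B replaces A's linear upward scan over exponents by a binary search over the
-- exponent (the predicate "some multiple of base^k lies in [a,b]" is monotone in k);
-- equivalence is claimed on the natural domain base ≥ 2 (or empty range b ≤ 0).

-- ===== PORT A =====
def pyCheck (a : Int) (b : Int) (value : Int) : Bool :=
  -- highest_mult = b // value; highest_mult *= value; return a <= highest_mult
  decide (a ≤ PySem.Int.floordiv b value * value)

-- the while loop of A; fuel bounds the iterations (under Pre_ the loop always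
-- breaks long before the fuel runs out, which the proof establishes)
def aLoop (a : Int) (b : Int) (base : Int) (largest_k : Int) (value : Int) (k : Int) : Nat → Int
  | 0 => largest_k
  | fuel+1 =>
    if value ≤ b then
      let value' := value * base
      if value' > b then largest_k
      else
        let k' := k + 1
        if pyCheck a b value' then aLoop a b base k' value' k' fuel
        else aLoop a b base largest_k value' k' fuel
    else largest_k

def compute_largest_k (a : Int) (b : Int) (base : Int) : Int :=
  aLoop a b base 0 1 0 (b.toNat + 1)

-- ===== PORT B =====
-- binary search: lo is always a feasible exponent (or 0), everything ≥ hi is infeasible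
def bSearch (a : Int) (b : Int) (base : Int) (lo : Int) (hi : Int) : Int :=
  if hi - lo > 1 then
    let mid := PySem.Int.floordiv (lo + hi) 2
    -- Python's base ** mid: on every reachable call 0 ≤ lo < mid, so .toNat is exact
    let v := base ^ mid.toNat
    if v ≤ b ∧ PySem.Int.floordiv b v * v ≥ a then bSearch a b base mid hi
    else bSearch a b base lo mid
  else lo
termination_by (hi - lo).toNat
decreasing_by
  all_goals
    have h2 := PySem.Int.floordiv_mul_add_mod (lo + hi) 2
    have h3 := PySem.Int.mod_nonneg (lo + hi) (by omega : (0:Int) < 2)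
    have h4 := PySem.Int.mod_lt (lo + hi) (by omega : (0:Int) < 2)
    omega

def compute_largest_k_alt (a : Int) (b : Int) (base : Int) : Int :=
  if b < 1 ∨ base < 2 then 0
  else bSearch a b base 0 (PySem.Int.bitLength b : Int)

-- ===== PRECONDITION & SPEC =====
-- Pre_ restricts to the task's natural domain: base ≥ 2, or b ≤ 0 (empty loop).
-- For base ∈ {-1, 0, 1} with b ≥ 1 the Python A diverges or raises ZeroDivisionError;
-- bases ≤ -2 (where A still returns) are outside the task's natural domain and excluded.
def Pre_compute_largest_k (a : Int) (b : Int) (base : Int) : Prop := b ≤ 0 ∨ 2 ≤ base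
instance (a : Int) (b : Int) (base : Int) : Decidable (Pre_compute_largest_k a b base) := by
  unfold Pre_compute_largest_k; infer_instance

def pvWitness_compute_largest_k : Int × Int × Int := (3, 20, 2)

def Spec_compute_largest_k (a : Int) (b : Int) (base : Int) (out : Int) : Prop := out = compute_largest_k_alt a b base
instance (a : Int) (b : Int) (base : Int) (out : Int) : Decidable (Spec_compute_largest_k a b base out) := by unfold Spec_compute_largest_k; infer_instance

-- ===== CLAIM (what is proved, stated in full; the proofs are below) =====
def Claim_equal_compute_largest_k : Prop := ∀ (a : Int) (b : Int) (base : Int), Dom_compute_largest_k a b base → Pre_compute_largest_k a b base → Spec_compute_largest_k a b base (compute_largest_k a b base)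


-- ===== LEMMAS AND PROOFS =====

-- the feasibility predicate: base^j ≤ b and some multiple of base^j lies in [a,b]
def Feas (a : Int) (b : Int) (base : Int) (j : Nat) : Prop :=
  base ^ j ≤ b ∧ a ≤ PySem.Int.floordiv b (base ^ j) * (base ^ j)

-- characterization of both programs' result: the greatest feasible exponent (0 if none)
def GoodRes (a : Int) (b : Int) (base : Int) (R : Int) : Prop :=
  0 ≤ R ∧ (R = 0 ∨ Feas a b base R.toNat) ∧ ∀ j : Nat, Feas a b base j → (j : Int) ≤ R

lemma goodRes_unique {a b base : Int} {R S : Int}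
    (hR : GoodRes a b base R) (hS : GoodRes a b base S) : R = S := by
  obtain ⟨hR0, hRf, hRmax⟩ := hR
  obtain ⟨hS0, hSf, hSmax⟩ := hS
  rcases hRf with hRz | hRp
  · rcases hSf with hSz | hSp
    · omega
    · have := hRmax _ hSp; omega
  · have h1 := hSmax _ hRp
    rcases hSf with hSz | hSp
    · omega
    · have h2 := hRmax _ hSp; omega

lemma pow_pos_of_two_le {base : Int} (hbase : 2 ≤ base) (j : Nat) : 0 < base ^ j :=
  pow_pos (by omega) j

-- feasibility is monotone downward in the exponent
lemma feas_mono {a b base : Int} (hbase : 2 ≤ base) {j : Nat}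
    (h : Feas a b base (j + 1)) : Feas a b base j := by
  obtain ⟨h1, h2⟩ := h
  have hv : 0 < base ^ j := pow_pos_of_two_le hbase j
  have hv' : 0 < base ^ (j + 1) := pow_pos_of_two_le hbase (j + 1)
  have hle : base ^ j ≤ base ^ (j + 1) := by
    calc base ^ j = base ^ j * 1 := by ring
    _ ≤ base ^ j * base := by
        exact mul_le_mul_of_nonneg_left (by omega) (le_of_lt hv)
    _ = base ^ (j + 1) := by rw [pow_succ]
  refine ⟨le_trans hle h1, ?_⟩
  -- m := floordiv b (base^(j+1)) * base^(j+1) is a multiple of base^j, and m ≤ b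
  set q := PySem.Int.floordiv b (base ^ (j + 1)) with hq
  have hm_le_b : q * base ^ (j + 1) ≤ b := by
    have := (PySem.Int.le_floordiv_iff_mul_le (a := b) (b := base ^ (j+1)) (q := q) hv').mpr
    exact (PySem.Int.le_floordiv_iff_mul_le hv').mp (le_refl q)
  have hmul : q * base ^ (j + 1) = (q * base) * base ^ j := by ring
  have hqb : q * base ≤ PySem.Int.floordiv b (base ^ j) := by
    rw [PySem.Int.le_floordiv_iff_mul_le hv]
    calc q * base * base ^ j = q * base ^ (j + 1) := by ring
    _ ≤ b := hm_le_b
  calc a ≤ q * base ^ (j + 1) := h2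
  _ = (q * base) * base ^ j := hmul
  _ ≤ PySem.Int.floordiv b (base ^ j) * base ^ j :=
      mul_le_mul_of_nonneg_right hqb (le_of_lt hv)

lemma feas_mono_le {a b base : Int} (hbase : 2 ≤ base) {i j : Nat}
    (hij : i ≤ j) (h : Feas a b base j) : Feas a b base i := by
  induction j with
  | zero => have hi0 : i = 0 := Nat.le_zero.mp hij; rw [hi0]; exact h
  | succ n ih =>
    rcases Nat.lt_or_ge i (n + 1) with hlt | hge
    · exact ih (by omega) (feas_mono hbase h)
    · have : i = n + 1 := by omega
      rw [this]; exact h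

-- the A loop computes the greatest feasible exponent
lemma aLoop_good (a b base : Int) (hb : 1 ≤ b) (hbase : 2 ≤ base) :
    ∀ (fuel kn : Nat) (largest_k : Int),
    base ^ kn ≤ b →
    b < base ^ kn * 2 ^ fuel →
    0 ≤ largest_k →
    (largest_k = 0 ∨ Feas a b base largest_k.toNat) →
    (∀ j : Nat, j ≤ kn → Feas a b base j → (j : Int) ≤ largest_k) →
    GoodRes a b base (aLoop a b base largest_k (base ^ kn) (kn : Int) fuel) := by
  intro fuel
  induction fuel with
  | zero =>
    intro kn largest_k hval hfuel _ _ _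
    exfalso
    simp only [pow_zero, mul_one] at hfuel
    omega
  | succ fuel ih =>
    intro kn largest_k hval hfuel hL0 hgood hmax
    have hv : 0 < base ^ kn := pow_pos_of_two_le hbase kn
    have hstep : base ^ kn * base = base ^ (kn + 1) := (pow_succ base kn).symm
    simp only [aLoop, if_pos hval]
    by_cases hbr : base ^ kn * base > b
    · rw [if_pos hbr]
      refine ⟨hL0, hgood, ?_⟩
      intro j hj
      rcases (by omega : j ≤ kn ∨ kn < j) with hle | hgt
      · exact hmax j hle hj
      · exfalso
        have h1 : base ^ (kn + 1) ≤ base ^ j := by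
          apply pow_le_pow_right₀ (by omega) (by omega)
        have h2 : base ^ j ≤ b := hj.1
        rw [← hstep] at h1
        omega
    · rw [if_neg hbr]
      have hval' : base ^ (kn + 1) ≤ b := by rw [← hstep]; omega
      have hfuel' : b < base ^ (kn + 1) * 2 ^ fuel := by
        have h2f : (0:Int) < 2 ^ fuel := pow_pos (by omega) fuel
        have : base ^ kn * 2 ^ (fuel + 1) ≤ base ^ (kn + 1) * 2 ^ fuel := by
          rw [← hstep, pow_succ]
          have : base ^ kn * 2 ≤ base ^ kn * base :=
            mul_le_mul_of_nonneg_left hbase (le_of_lt hv)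
          nlinarith
        omega
      have hcast : ((kn : Int) + 1) = ((kn + 1 : Nat) : Int) := by push_cast; ring
      by_cases hc : pyCheck a b (base ^ kn * base) = true
      · rw [if_pos hc, hcast]
        have hfeas : Feas a b base (kn + 1) := by
          refine ⟨hval', ?_⟩
          unfold pyCheck at hc
          rw [decide_eq_true_iff] at hc
          rw [← hstep]; exact hc
        have := ih (kn + 1) ((kn + 1 : Nat) : Int)
          hval' hfuel' (by positivity) (Or.inr (by simpa using hfeas))
          (fun j hj _ => by exact_mod_cast Int.ofNat_le.mpr hj)
        rw [← hstep] at this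
        exact this
      · rw [if_neg hc, hcast]
        have hmax' : ∀ j : Nat, j ≤ kn + 1 → Feas a b base j → (j : Int) ≤ largest_k := by
          intro j hj hfj
          rcases (by omega : j ≤ kn ∨ kn < j) with hle | hgt
          · exact hmax j hle hfj
          · exfalso
            have : j = kn + 1 := by omega
            rw [this] at hfj
            unfold pyCheck at hc
            rw [decide_eq_true_iff] at hc
            have h5 := hfj.2
            rw [← hstep] at h5
            exact hc h5
        have := ih (kn + 1) largest_k hval' hfuel' hL0 hgood hmax'
        rw [← hstep] at this
        exact this

-- the binary search computes the greatest feasible exponent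
lemma bSearch_good (a b base : Int) (hb : 1 ≤ b) (hbase : 2 ≤ base) :
    ∀ (lo hi : Int),
    0 ≤ lo → lo < hi →
    (lo = 0 ∨ Feas a b base lo.toNat) →
    (∀ j : Nat, Feas a b base j → (j : Int) < hi) →
    GoodRes a b base (bSearch a b base lo hi) := by
  intro lo hi
  induction lo, hi using bSearch.induct a b base with
  | case1 lo hi hgt mid v htest ih =>
    intro hlo0 hlt hlo hhi
    have h2 := PySem.Int.floordiv_mul_add_mod (lo + hi) 2
    have h3 := PySem.Int.mod_nonneg (lo + hi) (by omega : (0:Int) < 2)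
    have h4 := PySem.Int.mod_lt (lo + hi) (by omega : (0:Int) < 2)
    have hmid1 : lo < mid := by simp only [mid]; omega
    have hmid2 : mid < hi := by simp only [mid]; omega
    rw [bSearch, if_pos hgt, if_pos htest]
    apply ih (by omega) (by omega)
    · right
      exact ⟨htest.1, htest.2⟩
    · exact hhi
  | case2 lo hi hgt mid v htest ih =>
    intro hlo0 hlt hlo hhi
    have h2 := PySem.Int.floordiv_mul_add_mod (lo + hi) 2
    have h3 := PySem.Int.mod_nonneg (lo + hi) (by omega : (0:Int) < 2)
    have h4 := PySem.Int.mod_lt (lo + hi) (by omega : (0:Int) < 2)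
    have hmid1 : lo < mid := by simp only [mid]; omega
    have hmid2 : mid < hi := by simp only [mid]; omega
    rw [bSearch, if_pos hgt, if_neg htest]
    apply ih hlo0 hmid1 hlo
    intro j hj
    by_contra hge
    have hjm : mid.toNat ≤ j := by omega
    have : Feas a b base mid.toNat := feas_mono_le hbase hjm hj
    exact htest ⟨this.1, this.2⟩
  | case3 lo hi hgt =>
    intro hlo0 hlt hlo hhi
    rw [bSearch, if_neg hgt]
    refine ⟨hlo0, hlo, ?_⟩
    intro j hj
    have := hhi j hj
    omega

lemma a_good (a b base : Int) (hb : 1 ≤ b) (hbase : 2 ≤ base) :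
    GoodRes a b base (compute_largest_k a b base) := by
  unfold compute_largest_k
  have h1 : base ^ 0 ≤ b := by simpa using hb
  have hfuel : b < base ^ 0 * 2 ^ (b.toNat + 1) := by
    simp only [pow_zero, one_mul]
    have h2 : (b.toNat : Int) = b := Int.toNat_of_nonneg (by omega)
    have h3 : b.toNat < 2 ^ (b.toNat + 1) := Nat.lt_two_pow_self.trans
      (Nat.pow_lt_pow_right (by omega) (by omega))
    calc b = (b.toNat : Int) := h2.symm
    _ < ((2 ^ (b.toNat + 1) : Nat) : Int) := by exact_mod_cast h3
    _ = 2 ^ (b.toNat + 1) := by push_cast; ring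
  have := aLoop_good a b base hb hbase (b.toNat + 1) 0 0 h1 hfuel (le_refl 0)
    (Or.inl rfl) (fun j hj _ => by omega)
  simpa using this

lemma b_good (a b base : Int) (hb : 1 ≤ b) (hbase : 2 ≤ base) :
    GoodRes a b base (compute_largest_k_alt a b base) := by
  unfold compute_largest_k_alt
  rw [if_neg (by omega)]
  have hbl := PySem.Int.lt_two_pow_bitLength b
  have hbabs : b.natAbs = b.toNat := by omega
  apply bSearch_good a b base hb hbase 0 _ (le_refl 0) ?_ (Or.inl rfl) ?_
  · -- 0 < bitLength b
    have : 0 < PySem.Int.bitLength b := by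
      rcases Nat.eq_zero_or_pos (PySem.Int.bitLength b) with h0 | h0
      · rw [h0] at hbl; simp at hbl; omega
      · exact h0
    exact_mod_cast this
  · intro j hj
    have h2j : (2:Int) ^ j ≤ base ^ j := by
      apply pow_le_pow_left₀ (by omega) hbase
    have hjb : (2:Int) ^ j ≤ b := le_trans h2j hj.1
    have hnat : 2 ^ j ≤ b.toNat := by
      have : ((2 ^ j : Nat) : Int) ≤ b := by push_cast; exact hjb
      omega
    have : 2 ^ j < 2 ^ PySem.Int.bitLength b := by omega
    have := (Nat.pow_lt_pow_iff_right (by omega : 1 < 2)).mp this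
    exact_mod_cast this

-- ===== VERDICT (by name: the statement is the Claim_ definition above) =====
theorem compute_largest_k_spec : Claim_equal_compute_largest_k := by
  intro a b base _ hpre
  unfold Spec_compute_largest_k
  by_cases hb : 1 ≤ b
  · have hbase : 2 ≤ base := by
      unfold Pre_compute_largest_k at hpre
      omega
    exact goodRes_unique (a_good a b base hb hbase) (b_good a b base hb hbase)
  · -- b ≤ 0: both programs return 0 immediately
    have hb0 : b.toNat = 0 := by omega
    unfold compute_largest_k compute_largest_k_alt
    rw [hb0]
    simp only [aLoop]
    rw [if_neg (by omega), if_pos (by omega)]
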